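-- pv_equiv track=rewrite | github.com/hyewonleess/Programmers | 고득점Kit/Level1/모의고사.py | solution
-- ===== SOURCE A (Python) =====
-- def solution(answers):
--     n = len(answers)
--     p1 = [1,2,3,4,5]
--     p1 = p1*(n//len(p1)) + p1[:(n%len(p1))]
--     p2 = [2,1,2,3,2,4,2,5]
--     p2 = p2*(n//len(p2)) + p2[:(n%len(p2))]
--     p3 = [3,3,1,1,2,2,4,4,5,5]
--     p3 = p3*(n//len(p3)) + p3[:(n%len(p3))]
--
--     cnts = []
--     for p in [p1, p2, p3]:
--         cnt = 0
--         for i in range(len(answers)):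
--             if p[i] == answers[i]:
--                 cnt += 1
--         cnts.append(cnt)
--
--     answer = [i+1 for i, x in enumerate(cnts) if x == max(cnts)]
--     return answer
-- ===== SOURCE B (Python) =====
-- def solution(answers):
--     # One interleaved pass with modular indexing: no pattern tables are materialized.
--     P1 = [1, 2, 3, 4, 5]
--     P2 = [2, 1, 2, 3, 2, 4, 2, 5]
--     P3 = [3, 3, 1, 1, 2, 2, 4, 4, 5, 5]
--     c1 = c2 = c3 = 0
--     for i, a in enumerate(answers):
--         if P1[i % 5] == a:
--             c1 += 1
--         if P2[i % 8] == a: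
--             c2 += 1
--         if P3[i % 10] == a:
--             c3 += 1
--     cnts = [c1, c2, c3]
--     best = max(cnts)
--     return [i + 1 for i, x in enumerate(cnts) if x == best]
-- ===== Notes on version B (the rewrite author's own statement) =====
-- stated objective: simpler
-- what changed: B replaces A's three materialized repeated-pattern tables and three separate counting scans by a single pass over answers that keeps three counters and compares answers[i] against each base cycle at index i mod its length.
import Mathlib
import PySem

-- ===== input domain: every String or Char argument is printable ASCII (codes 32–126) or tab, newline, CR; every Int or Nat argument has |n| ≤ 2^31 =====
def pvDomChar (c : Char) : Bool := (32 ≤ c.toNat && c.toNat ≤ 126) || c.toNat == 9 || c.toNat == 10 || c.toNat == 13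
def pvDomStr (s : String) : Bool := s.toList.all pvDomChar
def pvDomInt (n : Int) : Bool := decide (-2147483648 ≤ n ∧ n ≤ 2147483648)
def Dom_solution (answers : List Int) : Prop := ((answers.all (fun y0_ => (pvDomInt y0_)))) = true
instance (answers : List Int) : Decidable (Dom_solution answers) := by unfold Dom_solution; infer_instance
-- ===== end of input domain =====

-- B replaces A's materialized repeated-pattern tables + three scans by one pass with three counters and modular indexing (simpler, O(1) extra space).

-- ===== PORT A =====
-- n = len(answers) is a nonnegative Python int; Nat division/modulo agree with Python's // and % here.
-- 'p * k' (list repetition) is ported as (List.replicate k p).flatten; 'p[:r]' with 0 ≤ r as p.take r.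
def solution (answers : List Int) : List Int :=
  let n := answers.length
  let p1 : List Int := [1, 2, 3, 4, 5]
  let p1 := (List.replicate (n / p1.length) p1).flatten ++ p1.take (n % p1.length)
  let p2 : List Int := [2, 1, 2, 3, 2, 4, 2, 5]
  let p2 := (List.replicate (n / p2.length) p2).flatten ++ p2.take (n % p2.length)
  let p3 : List Int := [3, 3, 1, 1, 2, 2, 4, 4, 5, 5]
  let p3 := (List.replicate (n / p3.length) p3).flatten ++ p3.take (n % p3.length)
  let cnts := [p1, p2, p3].foldl (fun cnts p =>
    let cnt := (PySem.List.pyRange 0 (n : Int) 1).foldl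
      (fun cnt i => if PySem.List.pyGetD p i 0 == PySem.List.pyGetD answers i 0 then cnt + 1 else cnt)
      (0 : Int)
    cnts ++ [cnt]) ([] : List Int)
  -- max(cnts): cnts always has 3 elements, so max? is some; .getD 0 is never taken.
  let m := (PySem.List.max? cnts (fun x => x)).getD 0
  ((PySem.List.enumerate cnts 0).filter (fun p => p.2 == m)).map (fun p => p.1 + 1)

-- ===== PORT B =====
def solution_alt (answers : List Int) : List Int :=
  let P1 : List Int := [1, 2, 3, 4, 5]
  let P2 : List Int := [2, 1, 2, 3, 2, 4, 2, 5]
  let P3 : List Int := [3, 3, 1, 1, 2, 2, 4, 4, 5, 5]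
  let c := (PySem.List.enumerate answers 0).foldl
    (fun (c : Int × Int × Int) ia =>
      (if PySem.List.pyGetD P1 (PySem.Int.mod ia.1 5) 0 == ia.2 then c.1 + 1 else c.1,
       if PySem.List.pyGetD P2 (PySem.Int.mod ia.1 8) 0 == ia.2 then c.2.1 + 1 else c.2.1,
       if PySem.List.pyGetD P3 (PySem.Int.mod ia.1 10) 0 == ia.2 then c.2.2 + 1 else c.2.2))
    ((0 : Int), (0 : Int), (0 : Int))
  let cnts := [c.1, c.2.1, c.2.2]
  -- max(cnts): cnts always has 3 elements, so max? is some; .getD 0 is never taken.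
  let best := (PySem.List.max? cnts (fun x => x)).getD 0
  ((PySem.List.enumerate cnts 0).filter (fun p => p.2 == best)).map (fun p => p.1 + 1)

-- ===== PRECONDITION & SPEC =====
def Spec_solution (answers : List Int) (out : List Int) : Prop := out = solution_alt answers
instance (answers : List Int) (out : List Int) : Decidable (Spec_solution answers out) := by unfold Spec_solution; infer_instance

-- ===== CLAIM (what is proved, stated in full; the proofs are below) =====
def Claim_equal_solution : Prop := ∀ (answers : List Int), Dom_solution answers → Spec_solution answers (solution answers)

-- ===== LEMMAS AND PROOFS =====

-- Indexing the flattened replication of P at k < q * |P| is indexing P at k % |P|.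
theorem flat_rep_getD (P : List Int) (d : Int) :
    ∀ (q k : Nat), k < q * P.length →
      ((List.replicate q P).flatten).getD k d = P.getD (k % P.length) d := by
  intro q
  induction q with
  | zero => intro k hk; omega
  | succ q ih =>
    intro k hk
    rw [List.replicate_succ, List.flatten_cons]
    by_cases h : k < P.length
    · rw [List.getD_append _ _ _ _ h, Nat.mod_eq_of_lt h]
    · have h' : P.length ≤ k := le_of_not_gt h
      rw [List.getD_append_right _ _ _ _ h', ih (k - P.length) (by nlinarith [Nat.sub_add_cancel h']),
        Nat.mod_eq_sub_mod h']

-- Indexing A's table 'P*(n//|P|) + P[:n%|P|]' at k < n is indexing P at k % |P|.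
theorem rep_getD (P : List Int) (hP : 0 < P.length) (d : Int) (n k : Nat) (hk : k < n) :
    ((List.replicate (n / P.length) P).flatten ++ P.take (n % P.length)).getD k d
      = P.getD (k % P.length) d := by
  have hlen : ((List.replicate (n / P.length) P).flatten).length = n / P.length * P.length := by
    simp [List.length_flatten]
  have hq : n / P.length * P.length + n % P.length = n := by
    rw [Nat.mul_comm]; exact Nat.div_add_mod n P.length
  have hr : n % P.length < P.length := Nat.mod_lt n hP
  by_cases h : k < n / P.length * P.length
  · rw [List.getD_append _ _ _ _ (by omega), flat_rep_getD P d _ k h]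
  · have h' : ((List.replicate (n / P.length) P).flatten).length ≤ k := by omega
    rw [List.getD_append_right _ _ _ _ h', hlen]
    have ht : k - n / P.length * P.length < n % P.length := by
      generalize hM : n / P.length * P.length = M at *; omega
    have hmod : k % P.length = k - n / P.length * P.length := by
      conv_lhs => rw [show k = n / P.length * P.length + (k - n / P.length * P.length) from by omega]
      rw [Nat.add_comm, Nat.add_mul_mod_self_right, Nat.mod_eq_of_lt (by omega)]
    rw [hmod]
    simp [List.getD_eq_getElem?_getD, ht]

-- A fold whose step updates the three components independently splits into three folds.
theorem foldl_triple (f g h : Int → (Int × Int) → Int) :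
    ∀ (l : List (Int × Int)) (a b c : Int),
      l.foldl (fun acc ia => (f acc.1 ia, g acc.2.1 ia, h acc.2.2 ia)) (a, b, c)
        = (l.foldl f a, l.foldl g b, l.foldl h c) := by
  intro l
  induction l with
  | nil => intro a b c; rfl
  | cons x t ih => intro a b c; simp [List.foldl_cons, ih]

-- A's count over the materialized table equals B's modular count, per pattern.
theorem count_eq (P : List Int) (hP : 0 < P.length) (L : Int) (hL : L = (P.length : Int))
    (answers : List Int) :
    (PySem.List.pyRange 0 (answers.length : Int) 1).foldl
      (fun cnt i => if PySem.List.pyGetD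
          ((List.replicate (answers.length / P.length) P).flatten ++ P.take (answers.length % P.length)) i 0
          == PySem.List.pyGetD answers i 0 then cnt + 1 else cnt) (0 : Int)
      = (PySem.List.enumerate answers 0).foldl
          (fun cnt ia => if PySem.List.pyGetD P (PySem.Int.mod ia.1 L) 0 == ia.2
            then cnt + 1 else cnt) (0 : Int) := by
  rw [PySem.List.enumerate_eq_map_pyRange (d := 0), List.foldl_map]
  apply PySem.List.foldl_congr_mem
  intro acc j hj
  rw [PySem.List.mem_pyRange_one] at hj
  obtain ⟨hj0, hjn⟩ := hj
  obtain ⟨k, rfl⟩ := Int.eq_ofNat_of_zero_le hj0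
  have h1 : PySem.List.pyGetD
      ((List.replicate (answers.length / P.length) P).flatten ++ P.take (answers.length % P.length))
      ((k : Int)) 0 = PySem.List.pyGetD P (PySem.Int.mod (k : Int) L) 0 := by
    rw [hL, PySem.Int.mod_natCast, PySem.List.pyGetD_natCast, PySem.List.pyGetD_natCast]
    exact rep_getD P hP 0 answers.length k (by exact_mod_cast hjn)
  simp [h1]

-- ===== VERDICT (by name: the statement is the Claim_ definition above) =====
theorem solution_spec : Claim_equal_solution := by
  intro answers _
  unfold Spec_solution solution solution_alt
  have e1 := count_eq [1,2,3,4,5] (by decide) 5 (by decide) answers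
  have e2 := count_eq [2,1,2,3,2,4,2,5] (by decide) 8 (by decide) answers
  have e3 := count_eq [3,3,1,1,2,2,4,4,5,5] (by decide) 10 (by decide) answers
  simp only [List.length_cons, List.length_nil] at e1 e2 e3 ⊢
  simp only [List.foldl_cons, List.foldl_nil]
  rw [foldl_triple
    (fun a ia => if PySem.List.pyGetD [1,2,3,4,5] (PySem.Int.mod ia.1 5) 0 == ia.2 then a + 1 else a)
    (fun a ia => if PySem.List.pyGetD [2,1,2,3,2,4,2,5] (PySem.Int.mod ia.1 8) 0 == ia.2 then a + 1 else a)
    (fun a ia => if PySem.List.pyGetD [3,3,1,1,2,2,4,4,5,5] (PySem.Int.mod ia.1 10) 0 == ia.2 then a + 1 else a)]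
  rw [← e1, ← e2, ← e3]
  rfl
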